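-- pv_equiv track=rewrite | github.com/dbsrlskfdk/boj-algorithm | Geometry/boj-17386.py | CCW
-- ===== SOURCE A (Python) =====
-- def CCW(coordinates):
--     N=3
--     sum = 0
--     for i in range(N-1):
--         sum += coordinates[i][0] * coordinates[i+1][1]
--         sum -= coordinates[i+1][0] * coordinates[i][1]
--     sum += coordinates[N-1][0] * coordinates[0][1]
--     sum -= coordinates[0][0] * coordinates[N-1][1]
--     return sum
-- ===== SOURCE B (Python) =====
-- def CCW(coordinates):
--     p, q, r = coordinates[0], coordinates[1], coordinates[2]
--     return (q[0] - p[0]) * (r[1] - p[1]) - (r[0] - p[0]) * (q[1] - p[1])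
-- ===== Notes on version B (the rewrite author's own statement) =====
-- stated objective: simpler
-- what changed: Replaces the shoelace accumulation loop over edge index i with the standard vector cross-product of (q-p) and (r-p), computed in one closed-form expression.
import Mathlib
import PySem

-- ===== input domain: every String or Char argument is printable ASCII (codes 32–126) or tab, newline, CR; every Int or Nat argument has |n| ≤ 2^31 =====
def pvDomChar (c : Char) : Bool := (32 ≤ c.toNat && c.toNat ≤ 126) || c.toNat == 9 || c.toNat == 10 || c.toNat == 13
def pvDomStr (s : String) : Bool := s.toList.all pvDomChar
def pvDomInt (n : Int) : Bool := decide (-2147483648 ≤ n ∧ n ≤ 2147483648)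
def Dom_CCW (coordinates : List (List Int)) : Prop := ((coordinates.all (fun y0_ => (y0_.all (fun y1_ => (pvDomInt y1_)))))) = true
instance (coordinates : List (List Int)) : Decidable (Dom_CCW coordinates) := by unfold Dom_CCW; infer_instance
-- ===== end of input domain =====

-- B replaces the fixed shoelace loop by the closed-form cross product (q-p)×(r-p); equal over the integers.

-- ===== PORT A =====
-- coordinates[i][j]; Pre_CCW excludes the inputs where Python raises IndexError, so getD is never hit inside the claim
def pvAt (coordinates : List (List Int)) (i j : Int) : Int :=
  ((PySem.List.pyGet? coordinates i).getD []) |> (fun r => (PySem.List.pyGet? r j).getD 0)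

def CCW (coordinates : List (List Int)) : Int :=
  let s := (PySem.List.pyRange 0 (3 - 1) 1).foldl
    (fun s i => s + pvAt coordinates i 0 * pvAt coordinates (i + 1) 1
                  - pvAt coordinates (i + 1) 0 * pvAt coordinates i 1) 0
  s + pvAt coordinates (3 - 1) 0 * pvAt coordinates 0 1
    - pvAt coordinates 0 0 * pvAt coordinates (3 - 1) 1

-- ===== PORT B =====
def CCW_alt (coordinates : List (List Int)) : Int :=
  let p := (PySem.List.pyGet? coordinates 0).getD []
  let q := (PySem.List.pyGet? coordinates 1).getD []
  let r := (PySem.List.pyGet? coordinates 2).getD []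
  let gx := fun (l : List Int) => (PySem.List.pyGet? l 0).getD 0
  let gy := fun (l : List Int) => (PySem.List.pyGet? l 1).getD 0
  (gx q - gx p) * (gy r - gy p) - (gx r - gx p) * (gy q - gy p)

-- ===== PRECONDITION & SPEC =====
-- Pre_ excludes exactly the inputs where A raises IndexError: fewer than 3 points, or one of the first three rows shorter than 2.
def Pre_CCW (coordinates : List (List Int)) : Prop :=
  3 ≤ coordinates.length ∧ ∀ r ∈ coordinates.take 3, 2 ≤ r.length
instance (coordinates : List (List Int)) : Decidable (Pre_CCW coordinates) := by unfold Pre_CCW; infer_instance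
def pvWitness_CCW : List (List Int) := [[0, 0], [1, 0], [0, 1]]

def Spec_CCW (coordinates : List (List Int)) (out : Int) : Prop := out = CCW_alt coordinates
instance (coordinates : List (List Int)) (out : Int) : Decidable (Spec_CCW coordinates out) := by unfold Spec_CCW; infer_instance

-- ===== CLAIM (what is proved, stated in full; the proofs are below) =====
def Claim_equal_CCW : Prop := ∀ (coordinates : List (List Int)), Dom_CCW coordinates → Pre_CCW coordinates → Spec_CCW coordinates (CCW coordinates)

-- ===== LEMMAS AND PROOFS =====

-- ===== VERDICT (by name: the statement is the Claim_ definition above) =====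
theorem CCW_spec : Claim_equal_CCW := by
  intro c _ hpre
  obtain ⟨hlen, hrows⟩ := hpre
  match c, hlen with
  | (p :: q :: r :: rest), _ =>
    have hp : 2 ≤ p.length := hrows p (by simp [List.take])
    have hq : 2 ≤ q.length := hrows q (by simp [List.take])
    have hr : 2 ≤ r.length := hrows r (by simp [List.take])
    match p, hp with
    | (x0 :: y0 :: t0), _ =>
      match q, hq with
      | (x1 :: y1 :: t1), _ =>
        match r, hr with
        | (x2 :: y2 :: t2), _ =>
          show _ = _
          have hrg : PySem.List.pyRange 0 (3 - 1) 1 = [0, 1] := by decide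
          have g1 : PySem.List.pyGet? ((x0 :: y0 :: t0) :: (x1 :: y1 :: t1) :: (x2 :: y2 :: t2) :: rest) 1
              = some (x1 :: y1 :: t1) := by
            simp [PySem.List.pyGet?, PySem.List.pyIdx?]
            rw [if_pos (by omega)]; simp
          have g2 : PySem.List.pyGet? ((x0 :: y0 :: t0) :: (x1 :: y1 :: t1) :: (x2 :: y2 :: t2) :: rest) 2
              = some (x2 :: y2 :: t2) := by
            simp [PySem.List.pyGet?, PySem.List.pyIdx?]
            rw [if_pos (by omega)]; simp
          have w0 : ∀ (a b : Int) (t : List Int), PySem.List.pyGet? (a :: b :: t) 0 = some a := by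
            intro a b t; simp [PySem.List.pyGet?, PySem.List.pyIdx?]; rw [if_pos (by omega)]; simp
          have w1 : ∀ (a b : Int) (t : List Int), PySem.List.pyGet? (a :: b :: t) 1 = some b := by
            intro a b t; simp [PySem.List.pyGet?, PySem.List.pyIdx?]
          simp only [CCW, CCW_alt, pvAt, hrg, List.foldl]
          norm_num [g1, g2, w0, w1]
          ring
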